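-- pv_equiv track=rewrite | github.com/Do-code-ing/Python_Programmers | Coding_Test_Lv4/07_kakao_무지의먹방라이브.py | solution
-- ===== SOURCE A (Python) =====
-- from collections import deque
--
-- def solution(food_times, k):
--     # 정전 시각전에 모든 음식을 섭취했다면
--     if k >= sum(food_times):
--         return -1
--
--     # 정전 시각보다 먹을 음식의 개수가 많다면
--     n = len(food_times)
--     if k < n:
--         return k + 1
--
--      # (food index, food value) 형식으로 저장하면서 value 순으로 오름차순 정렬
--     foods = deque(sorted(enumerate(food_times), key=lambda x:x[1]))
--     total_eaten = 0 # 현재까지 먹은 양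
--     last_eaten = 0  # 마지막으로 한 음식당 먹은 음식 양
--     while True:
--         to_eat = (foods[0][1] - last_eaten) * len(foods)    # 뭉텅이로 제거
--         if total_eaten + to_eat > k:
--             foods = sorted(foods, key=lambda x:x[0])
--             break
--
--         total_eaten += to_eat
--         last_eaten = foods.popleft()[1]
--
--     return foods[(k - total_eaten) % len(foods)][0] + 1
-- ===== SOURCE B (Python) =====
-- def solution(food_times, k):
--     if k >= sum(food_times):
--         return -1
--     n = len(food_times)
--     if k < n:
--         return k + 1
--     # threshold selection: largest level L (0 or a food value) with eaten_by(L) <= k;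
--     # no sorting, no simulation
--     def eaten_by(level):
--         return sum(min(v, level) for v in food_times)
--     L = 0
--     for v in set(food_times):
--         if v > L and eaten_by(v) <= k:
--             L = v
--     r = k - eaten_by(L)
--     alive = [i for i, v in enumerate(food_times) if v > L]
--     return alive[r % len(alive)] + 1
-- ===== Notes on version B (the rewrite author's own statement) =====
-- stated objective: alternative
-- what changed: B replaces A's sort-the-(index,time)-pairs plus chunk-by-chunk deque popping with a direct computation: it selects the largest threshold level L (0 or a food time) whose total consumption sum(min(v,L)) fits in k, then indexes the foods still above L with the leftover seconds modulo their count; no sorting and no deque.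
import Mathlib
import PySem

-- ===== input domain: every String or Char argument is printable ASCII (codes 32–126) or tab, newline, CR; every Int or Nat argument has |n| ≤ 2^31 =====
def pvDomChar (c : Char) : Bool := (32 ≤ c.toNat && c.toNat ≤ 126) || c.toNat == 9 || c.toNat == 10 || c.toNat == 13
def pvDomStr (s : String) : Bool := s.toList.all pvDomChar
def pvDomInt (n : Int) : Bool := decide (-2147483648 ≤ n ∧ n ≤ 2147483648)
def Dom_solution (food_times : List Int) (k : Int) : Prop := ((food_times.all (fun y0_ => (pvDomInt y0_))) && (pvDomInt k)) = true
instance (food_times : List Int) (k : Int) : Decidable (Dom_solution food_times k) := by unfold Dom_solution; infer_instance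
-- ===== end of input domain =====

-- B replaces A's sort + chunk-pop deque simulation by a direct threshold selection over
-- the distinct food values (no sorting, no deque); objective: alternative algorithm, same results.

-- ===== PORT A =====
-- the 'while True' loop: pops the value-sorted deque head chunk by chunk;
-- the [] branch is unreachable under A's guards (Python would raise IndexError there)
def chunkLoop (k : Int) : List (Int × Int) → Int → Int → List (Int × Int) × Int
  | [], total, _last => ([], total)
  | (i, v) :: rest, total, last =>
    let to_eat := (v - last) * ((((i, v) :: rest).length : Nat) : Int)
    if total + to_eat > k then
      (PySem.List.sorted ((i, v) :: rest) (fun p => p.1), total)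
    else
      chunkLoop k rest (total + to_eat) v

def solution (food_times : List Int) (k : Int) : Int :=
  if k ≥ food_times.sum then -1
  else
    let n : Int := (food_times.length : Int)
    if k < n then k + 1
    else
      let foods := PySem.List.sorted (PySem.List.enumerate food_times) (fun p => p.2)
      let res := chunkLoop k foods 0 0
      -- foods[(k - total_eaten) % len(foods)][0] + 1 ; none = IndexError, unreachable here
      match PySem.List.pyGet? res.1 (PySem.Int.mod (k - res.2) (res.1.length : Int)) with
      | some p => p.1 + 1
      | none => 0

-- ===== PORT B =====
-- eaten_by(level) = sum(min(v, level) for v in food_times)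
def eatenBy (food_times : List Int) (level : Int) : Int :=
  (food_times.map (fun v => min v level)).sum

-- the 'for v in set(food_times)' loop of Source B (result is order-independent: a conditional max)
def thresholdFold (food_times : List Int) (k : Int) : Int :=
  (PySem.Set.ofList food_times).foldl
    (fun L v => if L < v ∧ eatenBy food_times v ≤ k then v else L) 0

def solution_alt (food_times : List Int) (k : Int) : Int :=
  if k ≥ food_times.sum then -1
  else
    let n : Int := (food_times.length : Int)
    if k < n then k + 1
    else
      let L := thresholdFold food_times k
      let r := k - eatenBy food_times L
      let alive := ((PySem.List.enumerate food_times).filter (fun p => decide (L < p.2))).map (fun p => p.1)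
      match PySem.List.pyGet? alive (PySem.Int.mod r (alive.length : Int)) with
      | some i => i + 1
      | none => 0

-- ===== PRECONDITION & SPEC =====
def Spec_solution (food_times : List Int) (k : Int) (out : Int) : Prop := out = solution_alt food_times k
instance (food_times : List Int) (k : Int) (out : Int) : Decidable (Spec_solution food_times k out) := by unfold Spec_solution; infer_instance

-- ===== CLAIM (what is proved, stated in full; the proofs are below) =====
def Claim_equal_solution : Prop := ∀ (food_times : List Int) (k : Int), Dom_solution food_times k → Spec_solution food_times k (solution food_times k)

-- ===== LEMMAS AND PROOFS =====

-- eatenBy is monotone in the level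
theorem eatenBy_mono (vs : List Int) {a b : Int} (h : a ≤ b) : eatenBy vs a ≤ eatenBy vs b := by
  induction vs with
  | nil => simp [eatenBy]
  | cons u t ih =>
    simp only [eatenBy, List.map_cons, List.sum_cons] at *
    have : min u a ≤ min u b := by omega
    omega

-- below every element, eatenBy is level * length
theorem eatenBy_of_le (vs : List Int) {v : Int} (h : ∀ u ∈ vs, v ≤ u) :
    eatenBy vs v = v * (vs.length : Int) := by
  induction vs with
  | nil => simp [eatenBy]
  | cons u t ih =>
    have hu : v ≤ u := h u (by simp)
    have ht := ih (fun x hx => h x (by simp [hx]))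
    simp only [eatenBy, List.map_cons, List.sum_cons, List.length_cons] at *
    have : min u v = v := by omega
    rw [this, ht]; push_cast; ring

-- above every element, eatenBy is the full sum
theorem eatenBy_of_ge (vs : List Int) {v : Int} (h : ∀ u ∈ vs, u ≤ v) :
    eatenBy vs v = vs.sum := by
  induction vs with
  | nil => simp [eatenBy]
  | cons u t ih =>
    have hu : u ≤ v := h u (by simp)
    have ht := ih (fun x hx => h x (by simp [hx]))
    simp only [eatenBy, List.map_cons, List.sum_cons] at *
    have : min u v = u := by omega
    omega

theorem eatenBy_le_mul (vs : List Int) (v : Int) : eatenBy vs v ≤ v * (vs.length : Int) := by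
  induction vs with
  | nil => simp [eatenBy]
  | cons u t ih =>
    simp only [eatenBy, List.map_cons, List.sum_cons, List.length_cons] at *
    have : min u v ≤ v := by omega
    push_cast
    nlinarith [ih]

-- difference of eatenBy across a value-free gap
theorem eatenBy_gap (vs : List Int) {a b : Int} (hab : a ≤ b)
    (h : ∀ u ∈ vs, a < u → b ≤ u) :
    eatenBy vs b = eatenBy vs a + (vs.countP (fun u => decide (a < u))) * (b - a) := by
  induction vs with
  | nil => simp [eatenBy]
  | cons u t ih =>
    have ht := ih (fun x hx hax => h x (by simp [hx]) hax)
    simp only [eatenBy, List.map_cons, List.sum_cons, List.countP_cons] at *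
    by_cases hu : a < u
    · have hbu : b ≤ u := h u (by simp) hu
      have h1 : min u b = b := by omega
      have h2 : min u a = a := by omega
      simp [hu, h1, h2, ht]; ring
    · have h1 : min u b = u := by omega
      have h2 : min u a = u := by omega
      simp [hu, h1, h2, ht]; ring

theorem length_filter_enumerate (vs : List Int) (p : Int → Bool) : ∀ s : Int,
    (((PySem.List.enumerate vs s).filter (fun q => p q.2)).length : Int) = (vs.countP p : Int) := by
  induction vs with
  | nil => simp [PySem.List.enumerate_nil]
  | cons u t ih =>
    intro s
    rw [PySem.List.enumerate_cons]
    by_cases hu : p u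
    · simp [hu, ← ih (s + 1)]
    · simp [hu, ← ih (s + 1)]

-- Source B's fold over the distinct values: growth, sign, qualification, maximality
theorem fold_spec (vs : List Int) (k : Int) : ∀ (s : List Int) (L : Int), 0 ≤ L →
    (eatenBy vs L ≤ k ∨ L = 0) →
    (L ≤ s.foldl (fun L v => if L < v ∧ eatenBy vs v ≤ k then v else L) L ∧
     0 ≤ s.foldl (fun L v => if L < v ∧ eatenBy vs v ≤ k then v else L) L ∧
     (eatenBy vs (s.foldl (fun L v => if L < v ∧ eatenBy vs v ≤ k then v else L) L) ≤ k ∨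
       s.foldl (fun L v => if L < v ∧ eatenBy vs v ≤ k then v else L) L = 0) ∧
     (∀ v ∈ s, eatenBy vs v ≤ k → v ≤ s.foldl (fun L v => if L < v ∧ eatenBy vs v ≤ k then v else L) L) ∧
     (s.foldl (fun L v => if L < v ∧ eatenBy vs v ≤ k then v else L) L = L ∨
       s.foldl (fun L v => if L < v ∧ eatenBy vs v ≤ k then v else L) L ∈ s)) := by
  intro s
  induction s with
  | nil => intro L h0 hq; exact ⟨le_refl _, h0, hq, by simp, Or.inl rfl⟩
  | cons u t ih =>
    intro L h0 hq
    simp only [List.foldl_cons]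
    by_cases hc : L < u ∧ eatenBy vs u ≤ k
    · rw [if_pos hc]
      rcases ih u (by omega) (Or.inl hc.2) with ⟨hg, hp, hq', hm, hin⟩
      refine ⟨le_trans (le_of_lt hc.1) hg, hp, hq', ?_, ?_⟩
      · intro v hv hvk
        rcases List.mem_cons.mp hv with rfl | hv
        · exact hg
        · exact hm v hv hvk
      · rcases hin with h | h
        · exact Or.inr (by simp [h])
        · exact Or.inr (by simp [h])
    · rw [if_neg hc]
      rcases ih L h0 hq with ⟨hg, hp, hq', hm, hin⟩
      refine ⟨hg, hp, hq', ?_, ?_⟩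
      · intro v hv hvk
        rcases List.mem_cons.mp hv with rfl | hv
        · rcases not_and_or.mp hc with h | h
          · omega
          · exact absurd hvk h
        · exact hm v hv hvk
      · rcases hin with h | h
        · exact Or.inl h
        · exact Or.inr (by simp [h])

theorem mem_snd_of_mem_enum {vs : List Int} {p : Int × Int}
    (h : p ∈ PySem.List.enumerate vs) : p.2 ∈ vs := by
  have := List.mem_map_of_mem (f := fun q : Int × Int => q.2) h
  rwa [PySem.List.map_snd_enumerate vs 0] at this

theorem exists_enum_of_mem {vs : List Int} {u : Int} (h : u ∈ vs) :
    ∃ i, (i, u) ∈ PySem.List.enumerate vs := by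
  rw [← PySem.List.map_snd_enumerate vs 0] at h
  rcases List.mem_map.mp h with ⟨p, hp, hpu⟩
  exact ⟨p.1, by rwa [show (p.1, u) = p from by rw [← hpu]]⟩

theorem LB_props (vs : List Int) (k : Int) :
    0 ≤ thresholdFold vs k ∧
    (eatenBy vs (thresholdFold vs k) ≤ k ∨ thresholdFold vs k = 0) ∧
    (∀ v ∈ vs, eatenBy vs v ≤ k → v ≤ thresholdFold vs k) ∧
    (thresholdFold vs k = 0 ∨ thresholdFold vs k ∈ vs) := by
  unfold thresholdFold
  rcases fold_spec vs k (PySem.Set.ofList vs) 0 (le_refl 0) (Or.inr rfl) with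
    ⟨_, h0, hq, hmax, hin⟩
  refine ⟨h0, hq, ?_, ?_⟩
  · intro v hv hvk
    exact hmax v ((PySem.Set.mem_ofList vs v).mpr hv) hvk
  · rcases hin with h | h
    · exact Or.inl h
    · exact Or.inr ((PySem.Set.mem_ofList vs _).mp h)

theorem alive_ne_nil (vs : List Int) (k L : Int) (hk0 : 0 ≤ k) (hks : k < vs.sum)
    (hQ1 : eatenBy vs L ≤ k ∨ L = 0) :
    (PySem.List.enumerate vs).filter (fun p => decide (L < p.2)) ≠ [] := by
  intro hnil
  have hall : ∀ u ∈ vs, u ≤ L := by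
    intro u hu
    rcases List.mem_map.mp (by rw [PySem.List.map_snd_enumerate vs 0] ; exact hu :
        u ∈ (PySem.List.enumerate vs 0).map (fun p => p.2)) with ⟨p, hp, hpu⟩
    have := List.filter_eq_nil_iff.mp hnil p hp
    simp at this
    omega
  have hsum : eatenBy vs L = vs.sum := eatenBy_of_ge vs hall
  rcases hQ1 with h | h
  · omega
  · have := eatenBy_le_mul vs L
    rw [h] at hsum this
    simp at this
    omega

-- the final indexing step, shared by A and B's shapes
theorem final_eq (F : List (Int × Int)) (x y : Int) (hF : F ≠ []) :
    PySem.Int.mod x (F.length : Int) = PySem.Int.mod y (F.length : Int) →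
    (match PySem.List.pyGet? F (PySem.Int.mod x (F.length : Int)) with
      | some p => p.1 + 1
      | none => 0)
    = (match PySem.List.pyGet? (F.map (fun p => p.1)) (PySem.Int.mod y (((F.map (fun p => p.1)).length : Nat) : Int)) with
      | some i => i + 1
      | none => 0) := by
  intro hxy
  have hc : 0 < (F.length : Int) := by
    have := List.length_pos_iff.mpr hF
    exact_mod_cast this
  have hx := PySem.Int.mod_eq_emod_of_pos (a := x) hc
  have hy := PySem.Int.mod_eq_emod_of_pos (a := y) hc
  have hxe : 0 ≤ x % (F.length : Int) := Int.emod_nonneg x (by omega)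
  have hxl : x % (F.length : Int) < (F.length : Int) := Int.emod_lt_of_pos x hc
  simp only [List.length_map]
  rw [hx, hy] at hxy
  rw [hx, hy, ← hxy]
  have htn : (x % (F.length : Int)).toNat < F.length := by omega
  rw [PySem.List.pyGet?_of_nonneg F hxe, PySem.List.pyGet?_of_nonneg _ hxe]
  rw [List.getElem?_map]
  rw [List.getElem?_eq_getElem htn]
  simp

-- the chunk loop, from any steady state, lands on B's threshold
theorem chunk_go (vs : List Int) (k : Int) (hk0 : 0 ≤ k) (hks : k < vs.sum) :
    ∀ (ws : List (Int × Int)) (total last : Int),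
    ws.Pairwise (fun a b => a.2 ≤ b.2) →
    total = eatenBy vs last →
    eatenBy vs last ≤ k →
    (∀ w ∈ ws, last ≤ w.2) →
    (ws.filter (fun p => decide (last < p.2))).Perm
      ((PySem.List.enumerate vs).filter (fun p => decide (last < p.2))) →
    last ≤ thresholdFold vs k →
    (chunkLoop k ws total last).1
        = (PySem.List.enumerate vs).filter (fun p => decide (thresholdFold vs k < p.2)) ∧
    PySem.Int.mod (k - (chunkLoop k ws total last).2) (((chunkLoop k ws total last).1.length : Nat) : Int)
        = PySem.Int.mod (k - eatenBy vs (thresholdFold vs k))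
            ((((PySem.List.enumerate vs).filter (fun p => decide (thresholdFold vs k < p.2))).length : Int)) := by
  rcases LB_props vs k with ⟨hQ0, hQ1, hQ2, _⟩
  intro ws
  induction ws with
  | nil =>
    intro total last _ _ hlek _ hperm _
    exfalso
    have hnil : (PySem.List.enumerate vs).filter (fun p => decide (last < p.2)) = [] :=
      (List.Perm.nil_eq (by simpa using hperm)).symm
    have hall : ∀ u ∈ vs, u ≤ last := by
      intro u hu
      rcases exists_enum_of_mem hu with ⟨j, hj⟩
      have := List.filter_eq_nil_iff.mp hnil _ hj
      simp at this; omega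
    have := eatenBy_of_ge vs hall
    omega
  | cons hd rest ih =>
    obtain ⟨i, v⟩ := hd
    intro total last hpw htot hlek hlb hperm hlastLB
    have hvlast : last ≤ v := hlb (i, v) (by simp)
    have hrest_ge : ∀ w ∈ rest, v ≤ w.2 := (List.pairwise_cons.mp hpw).1
    have hge : ∀ u ∈ vs, last < u → v ≤ u := by
      intro u hu hlt
      rcases exists_enum_of_mem hu with ⟨j, hj⟩
      have hmem : (j, u) ∈ ((i, v) :: rest).filter (fun p => decide (last < p.2)) :=
        hperm.symm.subset (List.mem_filter.mpr ⟨hj, by simpa using hlt⟩)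
      rcases List.mem_cons.mp (List.mem_of_mem_filter hmem) with h | h
      · simp at h; omega
      · exact hrest_ge _ h
    have hlen : ∀ hlv : last < v,
        ((((i, v) :: rest).length : Nat) : Int) = (vs.countP (fun u => decide (last < u)) : Int) := by
      intro hlv
      have hself : ((i, v) :: rest).filter (fun p => decide (last < p.2)) = (i, v) :: rest := by
        apply List.filter_eq_self.mpr
        intro w hw
        rcases List.mem_cons.mp hw with h | h
        · simp [h]; omega
        · have := hrest_ge _ h; simp; omega
      rw [← length_filter_enumerate vs (fun u => decide (last < u)) 0]
      rw [← hperm.length_eq, hself]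
    have htoeat : total + (v - last) * ((((i, v) :: rest).length : Nat) : Int) = eatenBy vs v := by
      rcases eq_or_lt_of_le hvlast with h | h
      · subst h; simp [htot]
      · rw [hlen h, htot, eatenBy_gap vs hvlast hge]; ring
    by_cases hbr : total + (v - last) * ((((i, v) :: rest).length : Nat) : Int) > k
    · -- BREAK
      have hvk : k < eatenBy vs v := by omega
      have hlv : last < v := by
        rcases eq_or_lt_of_le hvlast with h | h
        · exfalso; rw [h] at hlek; omega
        · exact h
      have hself : ((i, v) :: rest).filter (fun p => decide (last < p.2)) = (i, v) :: rest := by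
        apply List.filter_eq_self.mpr
        intro w hw
        rcases List.mem_cons.mp hw with h | h
        · simp [h]; omega
        · have := hrest_ge _ h; simp; omega
      have hperm' : ((i, v) :: rest).Perm ((PySem.List.enumerate vs).filter (fun p => decide (last < p.2))) := by
        rw [← hself]; exact hperm
      have hgapLB : ∀ u ∈ vs, last < u → thresholdFold vs k < u := by
        intro u hu hlt
        by_contra hle
        push Not at hle
        have huv : v ≤ u := hge u hu hlt
        have hqu : eatenBy vs u ≤ k := by
          rcases hQ1 with h | h
          · exact le_trans (eatenBy_mono vs hle) h
          · have hu0 : u ≤ 0 := by omega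
            have h1 := eatenBy_le_mul vs u
            have h2 : u * ((vs.length : Nat) : Int) ≤ 0 := by
              have : (0:Int) ≤ ((vs.length : Nat) : Int) := by positivity
              nlinarith
            omega
        have := eatenBy_mono vs huv
        omega
      have hfeq : (PySem.List.enumerate vs).filter (fun p => decide (last < p.2))
          = (PySem.List.enumerate vs).filter (fun p => decide (thresholdFold vs k < p.2)) := by
        apply List.filter_congr
        intro p hp
        have hp2 : p.2 ∈ vs := mem_snd_of_mem_enum hp
        simp only [decide_eq_decide]
        constructor
        · intro h; exact hgapLB _ hp2 h
        · intro h; omega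
      have hfirst : PySem.List.sorted ((i, v) :: rest) (fun p => p.1)
          = (PySem.List.enumerate vs).filter (fun p => decide (thresholdFold vs k < p.2)) := by
        apply PySem.List.sorted_eq_of_perm_of_pairwise_lt
        · rw [← hfeq]; exact hperm'.symm
        · exact (PySem.List.pairwise_lt_enumerate vs 0).filter _
      have hcpos : 0 < ((((PySem.List.enumerate vs).filter (fun p => decide (thresholdFold vs k < p.2))).length : Nat) : Int) := by
        have := alive_ne_nil vs k (thresholdFold vs k) hk0 hks hQ1
        have := List.length_pos_iff.mpr this
        exact_mod_cast this
      have hcnt : ((((PySem.List.enumerate vs).filter (fun p => decide (thresholdFold vs k < p.2))).length : Nat) : Int)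
          = (vs.countP (fun u => decide (last < u)) : Int) := by
        rw [← hfeq, length_filter_enumerate vs (fun u => decide (last < u)) 0]
      have hgap2 := eatenBy_gap vs hlastLB (fun u hu hlt => le_of_lt (hgapLB u hu hlt))
      simp only [chunkLoop, if_pos hbr]
      refine ⟨hfirst, ?_⟩
      rw [hfirst, htot]
      rw [PySem.Int.mod_eq_emod_of_pos hcpos, PySem.Int.mod_eq_emod_of_pos hcpos]
      have : k - eatenBy vs last = (k - eatenBy vs (thresholdFold vs k))
          + ((((PySem.List.enumerate vs).filter (fun p => decide (thresholdFold vs k < p.2))).length : Nat) : Int)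
            * (thresholdFold vs k - last) := by
        rw [hgap2, hcnt]; ring
      rw [this, Int.add_mul_emod_self_left]
    · -- POP
      have hvk : eatenBy vs v ≤ k := by omega
      have hperm2 : (rest.filter (fun p => decide (v < p.2))).Perm
          ((PySem.List.enumerate vs).filter (fun p => decide (v < p.2))) := by
        have h1 := hperm.filter (fun p => decide (v < p.2))
        have h2 : ∀ (l : List (Int × Int)),
            (l.filter (fun p => decide (last < p.2))).filter (fun p => decide (v < p.2))
            = l.filter (fun p => decide (v < p.2)) := by
          intro l
          rw [List.filter_filter]
          apply List.filter_congr
          intro p _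
          by_cases h : v < p.2
          · have : last < p.2 := by omega
            simp [h, this]
          · simp [h]
        rw [h2, h2] at h1
        have h3 : ((i, v) :: rest).filter (fun p => decide (v < p.2))
            = rest.filter (fun p => decide (v < p.2)) := by
          simp
        rwa [h3] at h1
      have hvLB : v ≤ thresholdFold vs k := by
        rcases eq_or_lt_of_le hvlast with h | h
        · omega
        · have hmem : (i, v) ∈ ((i, v) :: rest).filter (fun p => decide (last < p.2)) :=
            List.mem_filter.mpr ⟨by simp, by simpa using h⟩
          have : (i, v) ∈ (PySem.List.enumerate vs).filter (fun p => decide (last < p.2)) :=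
            hperm.subset hmem
          have hv_vs : v ∈ vs := mem_snd_of_mem_enum (List.mem_of_mem_filter this)
          exact hQ2 v hv_vs hvk
      have hrec := ih (total + (v - last) * ((((i, v) :: rest).length : Nat) : Int)) v
        (List.pairwise_cons.mp hpw).2 htoeat (htoeat ▸ hvk) hrest_ge hperm2 hvLB
      simpa only [chunkLoop, if_neg hbr] using hrec

-- ===== VERDICT (by name: the statement is the Claim_ definition above) =====
-- main branch of the equivalence, stated as a standalone lemma
theorem main_branch (vs : List Int) (k : Int)
    (hks : ¬ k ≥ vs.sum) (hkn : ¬ k < ((vs.length : Nat) : Int)) :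
    (let foods := PySem.List.sorted (PySem.List.enumerate vs) (fun p => p.2)
     let res := chunkLoop k foods 0 0
     match PySem.List.pyGet? res.1 (PySem.Int.mod (k - res.2) (res.1.length : Int)) with
      | some p => p.1 + 1
      | none => 0)
    = (let L := thresholdFold vs k
       let r := k - eatenBy vs L
       let alive := ((PySem.List.enumerate vs).filter (fun p => decide (L < p.2))).map (fun p => p.1)
       match PySem.List.pyGet? alive (PySem.Int.mod r (alive.length : Int)) with
        | some i => i + 1
        | none => 0) := by
  rcases LB_props vs k with ⟨hQ0, hQ1, hQ2, hQin⟩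
  have hk0 : (0:Int) ≤ k := le_trans (by positivity) (not_lt.mp hkn)
  have hks' : k < vs.sum := not_le.mp hks
  have hFne : (PySem.List.enumerate vs).filter (fun p => decide (thresholdFold vs k < p.2)) ≠ [] :=
    alive_ne_nil vs k (thresholdFold vs k) hk0 hks' hQ1
  rcases hfoods : PySem.List.sorted (PySem.List.enumerate vs) (fun p => p.2) with _ | ⟨⟨i1, v1⟩, rest⟩
  · exfalso
    have : PySem.List.enumerate vs = [] := (PySem.List.sorted_eq_nil_iff _ _ _).mp hfoods
    have hvs : vs = [] := by
      have := congrArg (List.map (fun p : Int × Int => p.2)) this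
      rwa [PySem.List.map_snd_enumerate vs 0] at this
    rw [hvs] at hks'
    simp at hks'
    omega
  · have hperm : ((i1, v1) :: rest).Perm (PySem.List.enumerate vs) := by
      rw [← hfoods]; exact PySem.List.sorted_perm _ _ _
    have hpw : ((i1, v1) :: rest).Pairwise (fun a b => a.2 ≤ b.2) := by
      rw [← hfoods]; exact PySem.List.sorted_pairwise _ _
    have hmin : ∀ u ∈ vs, v1 ≤ u := by
      intro u hu
      rcases exists_enum_of_mem hu with ⟨j, hj⟩
      exact PySem.List.key_head_sorted_le _ _ hfoods (j, u) hj
    have hlenf : ((((i1, v1) :: rest).length : Nat) : Int) = ((vs.length : Nat) : Int) := by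
      rw [hperm.length_eq, PySem.List.length_enumerate]
    have htot1 : (0:Int) + (v1 - 0) * ((((i1, v1) :: rest).length : Nat) : Int) = eatenBy vs v1 := by
      rw [hlenf, eatenBy_of_le vs hmin]; ring
    dsimp only
    by_cases hbr : (0:Int) + (v1 - 0) * ((((i1, v1) :: rest).length : Nat) : Int) > k
    · -- first iteration already breaks: nothing qualifies, threshold 0, all foods alive
      have hv1k : k < eatenBy vs v1 := by omega
      have hnoq : ∀ u ∈ vs, ¬ (eatenBy vs u ≤ k) := by
        intro u hu hq
        have := eatenBy_mono vs (hmin u hu)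
        omega
      have hLB0 : thresholdFold vs k = 0 := by
        rcases hQin with h | h
        · exact h
        · rcases hQ1 with h1 | h1
          · exact absurd h1 (hnoq _ h)
          · exact h1
      have hv1pos : 1 ≤ v1 := by
        by_contra hle
        push Not at hle
        have h1 := eatenBy_le_mul vs v1
        have hn : (0:Int) ≤ ((vs.length : Nat) : Int) := by positivity
        nlinarith
      have hall_pos : ∀ u ∈ vs, (0:Int) < u := fun u hu => lt_of_lt_of_le (by omega) (hmin u hu)
      have heat0 : eatenBy vs 0 = 0 := by
        rw [eatenBy_of_le vs (fun u hu => le_of_lt (hall_pos u hu))]; ring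
      have hfall : (PySem.List.enumerate vs).filter (fun p => decide (thresholdFold vs k < p.2))
          = PySem.List.enumerate vs := by
        rw [hLB0]
        apply List.filter_eq_self.mpr
        intro p hp
        have := hall_pos p.2 (mem_snd_of_mem_enum hp)
        simpa using this
      have hsorted1 : PySem.List.sorted ((i1, v1) :: rest) (fun p => p.1) = PySem.List.enumerate vs := by
        apply PySem.List.sorted_eq_of_perm_of_pairwise_lt
        · exact hperm.symm
        · exact PySem.List.pairwise_lt_enumerate vs 0
      simp only [chunkLoop, if_pos hbr, hsorted1]
      rw [hfall]
      have := final_eq (PySem.List.enumerate vs) (k - 0) (k - eatenBy vs (thresholdFold vs k))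
        (by rw [← hfall]; exact hFne)
        (by rw [hLB0, heat0])
      simpa using this
    · -- first pop, then the chunk loop lemma takes over
      have hv1k : eatenBy vs v1 ≤ k := by omega
      have hperm1 : (rest.filter (fun p => decide (v1 < p.2))).Perm
          ((PySem.List.enumerate vs).filter (fun p => decide (v1 < p.2))) := by
        have h1 := hperm.filter (fun p => decide (v1 < p.2))
        have h3 : ((i1, v1) :: rest).filter (fun p => decide (v1 < p.2))
            = rest.filter (fun p => decide (v1 < p.2)) := by
          simp
        rwa [h3] at h1
      have hv1LB : v1 ≤ thresholdFold vs k := by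
        have hv1_vs : v1 ∈ vs := mem_snd_of_mem_enum (hperm.subset (List.mem_cons_self))
        exact hQ2 v1 hv1_vs hv1k
      have hrec := chunk_go vs k hk0 hks' rest
        ((0:Int) + (v1 - 0) * ((((i1, v1) :: rest).length : Nat) : Int)) v1
        (List.pairwise_cons.mp hpw).2 htot1 (htot1 ▸ hv1k)
        (List.pairwise_cons.mp hpw).1 hperm1 hv1LB
      have hstep : chunkLoop k ((i1, v1) :: rest) 0 0
          = chunkLoop k rest ((0:Int) + (v1 - 0) * ((((i1, v1) :: rest).length : Nat) : Int)) v1 := by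
        simp only [chunkLoop, if_neg hbr]
      rw [hstep]
      rcases hrec with ⟨hr1, hr2⟩
      rw [hr1] at hr2
      have := final_eq ((PySem.List.enumerate vs).filter (fun p => decide (thresholdFold vs k < p.2)))
        (k - (chunkLoop k rest ((0:Int) + (v1 - 0) * ((((i1, v1) :: rest).length : Nat) : Int)) v1).2)
        (k - eatenBy vs (thresholdFold vs k)) hFne (by exact_mod_cast hr2)
      rw [hr1] at *
      simpa using this

-- ===== VERDICT (by name: the statement is the Claim_ definition above) =====
theorem solution_spec : Claim_equal_solution := by
  intro vs k _hdom
  show solution vs k = solution_alt vs k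
  unfold solution solution_alt
  by_cases h1 : k ≥ vs.sum
  · simp [h1]
  · rw [if_neg h1, if_neg h1]
    by_cases h2 : k < ((vs.length : Nat) : Int)
    · simp [h2]
    · rw [if_neg h2, if_neg h2]
      exact main_branch vs k h1 h2
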